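-- pv_equiv track=rewrite | github.com/bmachlin/bmachlin.github.io | python/simple_template.py | ParseTemplateVars
-- ===== SOURCE A (Python) =====
-- TEMPLATE_VAR_START = "{{"
--
-- TEMPLATE_VAR_END = "}}"
--
-- def ParseTemplateVars(templateString):
--     variables = []
--
--     for i in range(len(templateString)):
--         # find the start of a variable
--         if templateString[i:i+len(TEMPLATE_VAR_START)] == TEMPLATE_VAR_START:
--             start = i
--             # find the end of the variable
--             end = templateString.find(TEMPLATE_VAR_END, start) + len(TEMPLATE_VAR_END)
--             # add the variable to the list sans variable syntax
--             variables.append(templateString[start + len(TEMPLATE_VAR_START) : end - len(TEMPLATE_VAR_END)])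
--
--     return variables
-- ===== SOURCE B (Python) =====
-- def ParseTemplateVars(templateString):
--     # Jump between occurrences with C-level find() instead of slicing at every
--     # index, and cache the last '}}' search result so each region is scanned once.
--     variables = []
--     end = templateString.find("}}")
--     i = templateString.find("{{")
--     while i != -1:
--         if -1 < end < i:
--             end = templateString.find("}}", i)
--         variables.append(templateString[i+2:end])
--         i = templateString.find("{{", i + 1)
--     return variables
-- ===== Notes on version B (the rewrite author's own statement) =====
-- stated objective: faster
-- what changed: Instead of slicing and comparing at every single index and re-running find('}}', i) from scratch for each '{{' (an O(n) scan each time), B jumps straight from one '{{' occurrence to the next with find() and caches the last '}}' search result, rescanning only text not already scanned.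
import Mathlib
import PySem

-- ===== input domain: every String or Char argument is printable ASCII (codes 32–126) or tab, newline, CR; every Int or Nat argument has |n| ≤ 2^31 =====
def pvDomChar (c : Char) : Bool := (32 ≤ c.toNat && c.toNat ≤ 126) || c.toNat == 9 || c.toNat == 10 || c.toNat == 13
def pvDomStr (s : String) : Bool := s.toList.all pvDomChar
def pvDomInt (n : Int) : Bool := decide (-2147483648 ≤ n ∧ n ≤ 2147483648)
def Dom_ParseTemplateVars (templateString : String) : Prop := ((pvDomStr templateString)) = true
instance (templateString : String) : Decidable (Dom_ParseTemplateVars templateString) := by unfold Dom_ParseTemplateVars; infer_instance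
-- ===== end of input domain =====

-- B jumps between occurrences with find() and caches the last '}}' search result instead of testing every index; return values are proved equal on all inputs (measured faster in a timing run).

-- ===== PORT A =====
-- literal port of A: scan every index i, on '{{' call find('}}', i) and slice.
def ParseTemplateVars (templateString : String) : List String :=
  let s := templateString.toList
  (PySem.List.pyRange 0 (s.length : Int) 1).foldl
    (fun vars i =>
      if PySem.List.slice s (some i) (some (i + 2)) = "{{".toList then
        let start := i
        let stop := PySem.Chars.findFrom s "}}".toList start none + 2
        vars ++ [String.ofList (PySem.List.slice s (some (start + 2)) (some (stop - 2)))]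
      else vars)
    []

-- ===== PORT B =====
-- literal port of B's while loop; fuel (s.length + 1) only bounds the iteration
-- count (i starts ≥ 0 and strictly increases, so it is never exhausted).
def pvGoB (s : List Char) : Nat → List (List Char) → Int → Int → List (List Char)
  | 0, vars, _, _ => vars
  | fuel + 1, vars, e, i =>
    if i = -1 then vars
    else
      let e' := if -1 < e ∧ e < i then PySem.Chars.findFrom s "}}".toList i none else e
      let vars' := vars ++ [PySem.List.slice s (some (i + 2)) (some e')]
      pvGoB s fuel vars' e' (PySem.Chars.findFrom s "{{".toList (i + 1) none)

def ParseTemplateVars_alt (templateString : String) : List String :=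
  let s := templateString.toList
  (pvGoB s (s.length + 1) []
      (PySem.Chars.find s "}}".toList)
      (PySem.Chars.find s "{{".toList)).map String.ofList

-- ===== PRECONDITION & SPEC =====
def Spec_ParseTemplateVars (templateString : String) (out : List String) : Prop := out = ParseTemplateVars_alt templateString
instance (templateString : String) (out : List String) : Decidable (Spec_ParseTemplateVars templateString out) := by unfold Spec_ParseTemplateVars; infer_instance

-- ===== CLAIM (what is proved, stated in full; the proofs are below) =====
def Claim_equal_ParseTemplateVars : Prop := ∀ (templateString : String), Dom_ParseTemplateVars templateString → Spec_ParseTemplateVars templateString (ParseTemplateVars templateString)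

-- ===== LEMMAS AND PROOFS =====

-- the value of Python's templateString.find("}}", k)
def pvE (s : List Char) (k : Nat) : Int := PySem.Chars.findFrom s "}}".toList (k : Int) none

-- the content A and B both extract for a '{{' found at index i
def pvItem (s : List Char) (i : Nat) : List Char :=
  PySem.List.slice s (some ((i : Int) + 2)) (some (pvE s i))

def pvCond (s : List Char) (i : Nat) : Bool :=
  decide (PySem.List.slice s (some (i : Int)) (some ((i : Int) + 2)) = "{{".toList)

lemma sliceTake (s : List Char) (k : Nat) :
    PySem.List.slice s (some (k : Int)) (some ((k : Int) + 2)) = (s.drop k).take 2 := by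
  simp only [PySem.List.slice, PySem.List.clampIdx]
  by_cases h : k ≤ s.length
  · have h2 : ((k : Int) + 2).toNat = k + 2 := by omega
    split_ifs with h1 <;> try omega
    simp only [Int.toNat_natCast, h2, min_eq_left h]
    by_cases h3 : k + 2 ≤ s.length
    · rw [min_eq_left h3]; congr 1; omega
    · rw [min_eq_right (by omega)]
      rw [List.take_of_length_le (by simp), List.take_of_length_le (by simp; omega)]
  · split_ifs with h1 <;> try omega
    rw [List.drop_eq_nil_of_le (by omega), List.drop_eq_nil_of_le (by omega)]
    simp

lemma condIff (s p : List Char) (hp : p.length = 2) (k : Nat) :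
    PySem.List.slice s (some (k : Int)) (some ((k : Int) + 2)) = p ↔ p <+: s.drop k := by
  rw [sliceTake, List.prefix_iff_eq_take, hp, eq_comm]

-- glue: a prefix of 'l.drop j' is an infix of l
lemma pvInfix_of_prefix_drop {α : Type} {p l : List α} {j : Nat} (h : p <+: l.drop j) :
    p <:+: l :=
  h.isInfix.trans (List.drop_suffix j l).isInfix

-- an occurrence at e0, none in [i, e0): find("}}", i) is exactly e0
lemma pvE_eq (s : List Char) (i e0 : Nat) (hi : i ≤ s.length) (hie : i ≤ e0)
    (hocc : "}}".toList <+: s.drop e0)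
    (hmin : ∀ m, i ≤ m → m < e0 → ¬ "}}".toList <+: s.drop m) :
    pvE s i = (e0 : Int) := by
  unfold pvE
  have hinf : "}}".toList <:+: s.drop i := by
    have heq : i + (e0 - i) = e0 := by omega
    exact pvInfix_of_prefix_drop (l := s.drop i) (j := e0 - i)
      (by rw [List.drop_drop, heq]; exact hocc)
  have hne : PySem.Chars.findFrom s "}}".toList (i : Int) none ≠ -1 := fun h =>
    ((PySem.Chars.findFrom_natCast_eq_neg_one_iff s _ i hi).mp h) hinf
  obtain ⟨h1, h2, h3⟩ := PySem.Chars.findFrom_natCast_spec s _ i hi hne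
  have hub : ¬ e0 < (PySem.Chars.findFrom s "}}".toList (i : Int) none).toNat :=
    fun hlt => h3 e0 hie hlt hocc
  have hlb : ¬ (PySem.Chars.findFrom s "}}".toList (i : Int) none).toNat < e0 :=
    fun hlt => hmin _ (by omega) hlt h2
  omega

-- once find("}}", j) = -1, every later search is -1 too
lemma pvE_mono_none (s : List Char) (j i : Nat) (hji : j ≤ i) (hi : i ≤ s.length)
    (h : pvE s j = -1) : pvE s i = -1 := by
  unfold pvE at *
  rw [PySem.Chars.findFrom_natCast_eq_neg_one_iff s _ j (le_trans hji hi)] at h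
  rw [PySem.Chars.findFrom_natCast_eq_neg_one_iff s _ i hi]
  intro hinf
  apply h
  have heq : s.drop i = (s.drop j).drop (i - j) := by
    rw [List.drop_drop]; congr 1; omega
  rw [heq] at hinf
  exact hinf.trans (List.drop_suffix (i - j) (s.drop j)).isInfix

-- a cached find("}}", j) result that is still ahead of i is find("}}", i)
lemma pvE_cache (s : List Char) (j i : Nat) (hji : j ≤ i) (hi : i ≤ s.length)
    (h : (i : Int) ≤ pvE s j) : pvE s i = pvE s j := by
  have hne : pvE s j ≠ -1 := by omega
  obtain ⟨h1, h2, h3⟩ :=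
    PySem.Chars.findFrom_natCast_spec s "}}".toList j (le_trans hji hi) hne
  have hE : pvE s j = ((pvE s j).toNat : Int) := by unfold pvE at *; omega
  rw [hE]
  exact pvE_eq s i _ hi (by omega)
    (by unfold pvE at *; exact h2)
    (fun m hm1 hm2 => h3 m (by omega) (by unfold pvE at *; omega))

-- splitting a strictly increasing list at its first element ≥ k (which is m)
lemma pvSplit (l : List Nat) (hp : l.Pairwise (· < ·)) (m k : Nat) (hm : m ∈ l)
    (hk : k ≤ m) (hnone : ∀ x ∈ l, k ≤ x → x < m → False) :
    l.filter (fun x => decide (k ≤ x)) = m :: l.filter (fun x => decide (m + 1 ≤ x)) := by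
  induction l with
  | nil => cases hm
  | cons a t ih =>
    have ha : ∀ x ∈ t, a < x := fun x hx => List.rel_of_pairwise_cons hp hx
    rcases List.mem_cons.mp hm with hm | hm
    · subst hm
      rw [List.filter_cons, if_pos (by simpa using hk)]
      rw [List.filter_cons, if_neg (by simp)]
      congr 1
      apply List.filter_congr
      intro x hx
      have := ha x hx
      simp only [decide_eq_decide]
      omega
    · have ham : a < m := ha m hm
      have hka : ¬ k ≤ a := fun hka => hnone a (List.mem_cons_self) hka ham
      rw [List.filter_cons, if_neg (by simpa using hka)]
      rw [List.filter_cons, if_neg (by simp; omega)]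
      exact ih (List.Pairwise.of_cons hp) hm
        (fun x hx => hnone x (List.mem_cons_of_mem a hx))

-- the while loop, related to A's filtered index list
lemma pvLoop (s : List Char) (fuel k j : Nat) (vars : List (List Char)) (e : Int)
    (hk : k ≤ s.length) (hf : s.length + 1 - k ≤ fuel) (hj : j ≤ k) (he : e = pvE s j) :
    pvGoB s fuel vars e (PySem.Chars.findFrom s "{{".toList (k : Int) none)
      = vars ++ (((List.range s.length).filter (pvCond s)).filter
          (fun x => decide (k ≤ x))).map (pvItem s) := by
  induction fuel generalizing k j vars e with
  | zero => omega
  | succ fuel ih =>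
    by_cases hF : PySem.Chars.findFrom s "{{".toList (k : Int) none = -1
    · rw [hF]
      simp only [pvGoB]
      have hnm := (PySem.Chars.findFrom_natCast_eq_neg_one_iff s _ k hk).mp hF
      have : ((List.range s.length).filter (pvCond s)).filter
          (fun x => decide (k ≤ x)) = [] := by
        rw [List.filter_eq_nil_iff]
        intro x hx hkx
        rw [List.mem_filter, List.mem_range] at hx
        apply hnm
        have hpre : "{{".toList <+: s.drop x :=
          (condIff s _ (by decide) x).mp (by simpa [pvCond] using hx.2)
        have hkx' : k ≤ x := by simpa using hkx
        have heq : k + (x - k) = x := by omega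
        exact pvInfix_of_prefix_drop (l := s.drop k) (j := x - k)
          (by rw [List.drop_drop, heq]; exact hpre)
      rw [this]
      simp
    · obtain ⟨h1, h2, h3⟩ := PySem.Chars.findFrom_natCast_spec s _ k hk hF
      set F := PySem.Chars.findFrom s "{{".toList (k : Int) none with hFdef
      have hF0 : 0 ≤ F := le_trans (by exact_mod_cast Int.natCast_nonneg k) h1
      have hFm : F = (F.toNat : Int) := by omega
      have hkm : k ≤ F.toNat := by omega
      have hmn : F.toNat < s.length := by
        have := h2.length_le
        simp at this
        omega
      have hcondm : pvCond s F.toNat = true := by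
        simp only [pvCond, decide_eq_true_eq]
        exact (condIff s _ (by decide) F.toNat).mpr h2
      simp only [pvGoB, if_neg hF]
      have he' : (if -1 < e ∧ e < F then PySem.Chars.findFrom s "}}".toList F none else e)
          = pvE s F.toNat := by
        by_cases hc : -1 < e ∧ e < F
        · rw [if_pos hc, hFm]
          rfl
        · rw [if_neg hc]
          by_cases hnil : pvE s j = -1
          · rw [he, hnil, pvE_mono_none s j F.toNat (by omega) hmn.le hnil]
          · have hjn : j ≤ s.length := by omega
            obtain ⟨hb1, _, _⟩ :=
              PySem.Chars.findFrom_natCast_spec s "}}".toList j hjn hnil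
            have hge : (F.toNat : Int) ≤ pvE s j := by
              rw [he] at hc
              push Not at hc
              have hej : ((j : Nat) : Int) ≤ pvE s j := hb1
              have : F ≤ pvE s j := hc (by unfold pvE at *; omega)
              omega
            rw [he, pvE_cache s j F.toNat (by omega) hmn.le hge]
      rw [he']
      have hnext : F + 1 = ((F.toNat + 1 : Nat) : Int) := by omega
      have harg : PySem.List.slice s (some (F + 2)) (some (pvE s F.toNat))
          = pvItem s F.toNat := by
        unfold pvItem
        congr 2
        omega
      rw [harg, hnext]
      rw [ih (F.toNat + 1) F.toNat _ _ (by omega) (by omega) (by omega) rfl]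
      rw [pvSplit (((List.range s.length).filter (pvCond s)))
          ((List.pairwise_lt_range).filter _) F.toNat k
          (by rw [List.mem_filter, List.mem_range]; exact ⟨hmn, hcondm⟩)
          hkm
          (fun x hx hkx hxm => by
            rw [List.mem_filter, List.mem_range] at hx
            exact ((condIff s _ (by decide) x).mp
              (by simpa [pvCond] using hx.2)) |> h3 x hkx hxm)]
      simp

lemma altChar (t : String) :
    ParseTemplateVars_alt t =
      ((List.range t.toList.length).filter (pvCond t.toList)).map
        (fun i => String.ofList (pvItem t.toList i)) := by
  show (pvGoB t.toList (t.toList.length + 1) []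
      (PySem.Chars.find t.toList "}}".toList)
      (PySem.Chars.find t.toList "{{".toList)).map String.ofList = _
  rw [← PySem.Chars.findFrom_zero t.toList "}}".toList,
      ← PySem.Chars.findFrom_zero t.toList "{{".toList]
  rw [show (0 : Int) = ((0 : Nat) : Int) from rfl]
  show (pvGoB t.toList (t.toList.length + 1) [] (pvE t.toList 0)
      (PySem.Chars.findFrom t.toList "{{".toList ((0 : Nat) : Int) none)).map String.ofList = _
  rw [pvLoop t.toList (t.toList.length + 1) 0 0 [] (pvE t.toList 0)
      (by omega) (by omega) (by omega) rfl]
  simp [List.map_map, Function.comp_def]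

lemma aChar (t : String) :
    ParseTemplateVars t =
      ((List.range t.toList.length).filter (pvCond t.toList)).map
        (fun i => String.ofList (pvItem t.toList i)) := by
  show (PySem.List.pyRange 0 (t.toList.length : Int) 1).foldl _ [] = _
  rw [PySem.List.pyRange_zero_natCast, List.foldl_map]
  rw [PySem.List.foldl_congr_mem _ _
      (fun acc i => if pvCond t.toList i = true
        then acc ++ [String.ofList (pvItem t.toList i)] else acc) _
      (by
        intro acc i _
        simp only [pvCond, pvItem, pvE, decide_eq_true_eq, add_sub_cancel_right])]
  rw [PySem.List.foldl_append_if, List.nil_append]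

-- ===== VERDICT (by name: the statement is the Claim_ definition above) =====
theorem ParseTemplateVars_spec : Claim_equal_ParseTemplateVars := by
  intro t _
  unfold Spec_ParseTemplateVars
  rw [aChar t, altChar t]
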